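-- pv_equiv track=rewrite | github.com/jakubglinka/nlp | nlp/corpus/nkjp.py | _transform_list_of_tuples_to_dict
-- ===== SOURCE A (Python) =====
-- from typing import Union, Dict, List, Tuple, Any, Iterator, Callable
--
-- def _transform_list_of_tuples_to_dict(x: List[Tuple[Any, ...]]) \
--                         -> Dict[str, List[Tuple[str, int, int]]]:
--     d = {}
--     for key, values in x:
--         tt = d.setdefault(key, "")
--         for value in values:
--             tt += value
--         d[key] = tt
--
--     return d
-- ===== SOURCE B (Python) =====
-- def _transform_list_of_tuples_to_dict(x):
--     keys = list(dict.fromkeys(key for key, _ in x))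
--     return {k: "".join(v for key, values in x if key == k for v in values)
--             for k in keys}
-- ===== Notes on version B (the rewrite author's own statement) =====
-- stated objective: alternative
-- what changed: B first dedups the keys in first-appearance order, then for each key makes a separate pass over the whole input collecting and joining that key's values, instead of A's single pass maintaining a dict of running concatenated strings.
import Mathlib
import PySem

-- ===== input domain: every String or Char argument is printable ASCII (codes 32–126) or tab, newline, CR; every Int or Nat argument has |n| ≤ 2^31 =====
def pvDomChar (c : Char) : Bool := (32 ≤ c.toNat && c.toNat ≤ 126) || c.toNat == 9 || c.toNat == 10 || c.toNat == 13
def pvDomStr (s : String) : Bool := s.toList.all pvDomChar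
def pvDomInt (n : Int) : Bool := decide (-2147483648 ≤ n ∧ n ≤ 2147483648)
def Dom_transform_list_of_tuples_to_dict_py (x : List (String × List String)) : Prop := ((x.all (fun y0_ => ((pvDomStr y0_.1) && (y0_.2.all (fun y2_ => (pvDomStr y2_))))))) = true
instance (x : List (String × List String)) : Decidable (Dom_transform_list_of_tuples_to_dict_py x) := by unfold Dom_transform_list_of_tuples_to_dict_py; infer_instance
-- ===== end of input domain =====

-- B dedups the keys first (dict.fromkeys order), then collects and joins each key's
-- values in a separate pass over the input, instead of A's single dict-building pass
-- with running string concatenation; alternative structure, same result.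

-- ===== PORT A =====
-- d = {}; for key, values in x: tt = d.setdefault(key, ""); for value in values: tt += value; d[key] = tt
def transform_list_of_tuples_to_dict_py (x : List (String × List String)) : List (String × String) :=
  (x.foldl (fun d kv =>
      let d1 := d.setdefault kv.1 ""
      let tt := d1.getD kv.1 ""
      let tt := kv.2.foldl (fun t v => t ++ v) tt
      d1.insert kv.1 tt)
    PySem.Dict.empty).items

-- ===== PORT B =====
-- keys = list(dict.fromkeys(key for key, _ in x))
-- {k: "".join(v for key, values in x if key == k for v in values) for k in keys}
def transform_list_of_tuples_to_dict_py_alt (x : List (String × List String)) : List (String × String) :=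
  let keys := PySem.List.dedup (x.map (·.1))
  keys.map (fun k =>
    (k, PySem.Str.join "" ((x.filter (fun kv => kv.1 == k)).flatMap (·.2))))

-- ===== PRECONDITION & SPEC =====
def Spec_transform_list_of_tuples_to_dict_py (x : List (String × List String)) (out : List (String × String)) : Prop := out = transform_list_of_tuples_to_dict_py_alt x
instance (x : List (String × List String)) (out : List (String × String)) : Decidable (Spec_transform_list_of_tuples_to_dict_py x out) := by unfold Spec_transform_list_of_tuples_to_dict_py; infer_instance

-- ===== CLAIM (what is proved, stated in full; the proofs are below) =====
def Claim_equal_transform_list_of_tuples_to_dict_py : Prop := ∀ (x : List (String × List String)), Dom_transform_list_of_tuples_to_dict_py x → Spec_transform_list_of_tuples_to_dict_py x (transform_list_of_tuples_to_dict_py x)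

-- ===== LEMMAS AND PROOFS =====

theorem pvCharsJoin_nil (ls : List (List Char)) :
    PySem.Chars.join [] ls = ls.flatten := by
  induction ls with
  | nil => rfl
  | cons a t ih =>
    cases t with
    | nil => simp [PySem.Chars.join, List.intercalate]
    | cons b t =>
      simp only [PySem.Chars.join, List.intercalate, List.intersperse_cons₂] at *
      simp [ih]

theorem pvJoin_append (ps qs : List String) :
    PySem.Str.join "" (ps ++ qs) = PySem.Str.join "" ps ++ PySem.Str.join "" qs := by
  apply String.toList_inj.mp
  simp [String.toList_append, PySem.Str.toList_join, pvCharsJoin_nil]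

theorem pvFoldl_append (vs : List String) (s : String) :
    vs.foldl (fun t v => t ++ v) s = s ++ PySem.Str.join "" vs := by
  induction vs generalizing s with
  | nil =>
    apply String.toList_inj.mp
    simp [PySem.Str.toList_join]
  | cons v vs ih =>
    rw [List.foldl_cons, ih]
    apply String.toList_inj.mp
    simp [String.toList_append, PySem.Str.toList_join, pvCharsJoin_nil]

-- A's loop body, simplified: setdefault + overwrite at the same key is a plain insert of
-- the old value (default "") extended by the joined new values
theorem pvStepA_eq (d : PySem.Dict String String) (kv : String × List String) :
    (let d1 := d.setdefault kv.1 ""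
     let tt := d1.getD kv.1 ""
     let tt := kv.2.foldl (fun t v => t ++ v) tt
     d1.insert kv.1 tt)
    = d.insert kv.1 (d.getD kv.1 "" ++ PySem.Str.join "" kv.2) := by
  show ((d.setdefault kv.1 "").insert kv.1 _) = _
  rw [PySem.Dict.getD_setdefault_self, pvFoldl_append]
  by_cases h : d.contains kv.1 = true
  · rw [PySem.Dict.setdefault_of_contains d _ h]
  · rw [PySem.Dict.setdefault_of_not_contains d _ (by simpa using h),
      PySem.Dict.insert_insert_self]

-- the lookup after A's loop: each key's value is the start value followed by the join of
-- all values listed under that key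
theorem pvGetD_loop (x : List (String × List String)) (k : String) :
    ∀ (d : PySem.Dict String String),
    (x.foldl (fun d kv => d.insert kv.1 (d.getD kv.1 "" ++ PySem.Str.join "" kv.2)) d).getD k ""
      = d.getD k "" ++ PySem.Str.join "" ((x.filter (fun kv => kv.1 == k)).flatMap (·.2)) := by
  induction x with
  | nil =>
    intro d
    apply String.toList_inj.mp
    simp [PySem.Str.toList_join]
  | cons kv x ih =>
    intro d
    rw [List.foldl_cons, ih]
    by_cases h : kv.1 = k
    · subst h
      rw [PySem.Dict.getD_insert_self]
      simp only [List.filter_cons, beq_self_eq_true, if_true, List.flatMap_cons]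
      rw [pvJoin_append]
      apply String.toList_inj.mp
      simp [String.toList_append]
    · rw [PySem.Dict.getD_insert_of_ne d _ _ (fun hk : k = kv.1 => h hk.symm)]
      simp [h]

-- ===== VERDICT (by name: the statement is the Claim_ definition above) =====
theorem transform_list_of_tuples_to_dict_py_spec : Claim_equal_transform_list_of_tuples_to_dict_py := by
  intro x _
  show transform_list_of_tuples_to_dict_py x = transform_list_of_tuples_to_dict_py_alt x
  unfold transform_list_of_tuples_to_dict_py transform_list_of_tuples_to_dict_py_alt
  have hstep : (fun (d : PySem.Dict String String) (kv : String × List String) =>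
      let d1 := d.setdefault kv.1 ""
      let tt := d1.getD kv.1 ""
      let tt := kv.2.foldl (fun t v => t ++ v) tt
      d1.insert kv.1 tt)
      = fun d kv => d.insert kv.1 (d.getD kv.1 "" ++ PySem.Str.join "" kv.2) := by
    funext d kv; exact pvStepA_eq d kv
  rw [hstep]
  set D := x.foldl (fun d kv => d.insert kv.1 (d.getD kv.1 "" ++ PySem.Str.join "" kv.2))
    PySem.Dict.empty with hD
  have hkeys : D.keys = PySem.Set.ofList (x.map (·.1)) := by
    rw [hD, PySem.Dict.keys_foldl_insert_key]
    simp [PySem.Dict.keys_empty, PySem.Set.update, PySem.Set.ofList_eq_foldl]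
  have hnd : D.keys.Nodup := by rw [hkeys]; exact PySem.Set.nodup_ofList _
  rw [PySem.Dict.items_eq_map_keys D hnd "", hkeys]
  simp only [PySem.List.dedup_eq_ofList]
  apply List.map_congr_left
  intro k _
  rw [hD, pvGetD_loop]
  apply Prod.ext rfl
  apply String.toList_inj.mp
  simp [PySem.Dict.getD_empty]
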